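-- pv_equiv track=rewrite | github.com/gu-dsan6725/spring-2026-final-project-team_24 | backend/app/ingest/sub_chunker.py | _snap_back_to_whitespace
-- ===== SOURCE A (Python) =====
-- def _snap_back_to_whitespace(text: str, cut: int, tolerance: int) -> int:
--     """Return an adjusted cut index that lands on a whitespace char when possible.
--
--     Walks back up to ``tolerance`` chars looking for a ``\\n`` (preferred) or
--     any whitespace. If none found, returns the original ``cut``.
--     """
--     if cut >= len(text):
--         return len(text)
--     lo = max(0, cut - tolerance)
--     # Prefer paragraph/newline break.
--     nl = text.rfind("\n", lo, cut)
--     if nl != -1 and nl + 1 > lo: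
--         return nl + 1
--     ws = -1
--     for i in range(cut - 1, lo - 1, -1):
--         if text[i].isspace():
--             ws = i + 1
--             break
--     return ws if ws != -1 else cut
-- ===== SOURCE B (Python) =====
-- def _snap_back_to_whitespace(text: str, cut: int, tolerance: int) -> int:
--     """Single backward scan: return right after the rightmost newline in the
--     window, else right after the rightmost whitespace, else cut."""
--     n = len(text)
--     if cut >= n:
--         return n
--     lo = max(0, cut - tolerance)
--     ws = None
--     for i in range(cut - 1, lo - 1, -1):
--         c = text[i]
--         if c == "\n":
--             return i + 1
--         if ws is None and c.isspace():
--             ws = i + 1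
--     return ws if ws is not None else cut
-- ===== Notes on version B (the rewrite author's own statement) =====
-- stated objective: simpler
-- what changed: Replaces A's two passes (rfind for a newline, then a separate backward loop for whitespace) by one fused backward scan that returns immediately at the rightmost newline and remembers the rightmost whitespace seen.
-- intended difference: For negative cut with a newline in text[max(0,cut-tolerance):len(text)+cut], A's rfind wraps its end index to len(text)+cut and returns that newline's index+1, while B treats the walk-back window as empty and returns cut, the intended no-op for a degenerate negative cut. — e.g. on _snap_back_to_whitespace("a\nbc", -1, 5): A returns 2, B returns -1
import Mathlib
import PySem

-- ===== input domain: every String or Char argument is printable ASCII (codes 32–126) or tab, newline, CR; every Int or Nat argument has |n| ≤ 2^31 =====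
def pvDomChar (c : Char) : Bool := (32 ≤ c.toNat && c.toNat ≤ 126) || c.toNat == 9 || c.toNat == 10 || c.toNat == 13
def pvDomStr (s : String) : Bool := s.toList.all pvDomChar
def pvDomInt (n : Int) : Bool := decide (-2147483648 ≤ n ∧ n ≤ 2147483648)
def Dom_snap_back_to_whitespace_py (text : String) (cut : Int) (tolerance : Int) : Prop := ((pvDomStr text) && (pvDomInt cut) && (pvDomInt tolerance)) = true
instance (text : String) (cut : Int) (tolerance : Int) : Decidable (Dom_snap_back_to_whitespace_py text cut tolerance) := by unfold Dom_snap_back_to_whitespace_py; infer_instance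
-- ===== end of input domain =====

-- B fuses A's two passes (rfind for '\n', then a whitespace loop) into one backward scan; simpler, same cost.
-- For negative cut A's rfind wraps its end index (see D_ below); B returns cut there.


-- ===== PORT A =====
-- text.rfind("\n", s, e) for a single-char needle: rightmost i in [s, s+k) with cs[i] = '\n', else -1
-- (k = window length; scans from the top index down, exactly as rfind searches from the right).
def pvRfindNl (cs : List Char) (s : Nat) : Nat → Int
  | 0 => -1
  | k + 1 => if cs.getD (s + k) ' ' = '\n' then ((s + k : Nat) : Int) else pvRfindNl cs s k

-- the 'for i in range(cut-1, lo-1, -1)' whitespace loop of A: k iterations, top index lo+k-1 = cut-1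
def pvWsLoop (cs : List Char) (lo : Nat) : Nat → Int
  | 0 => -1
  | k + 1 => if PySem.Chars.isspace (cs.getD (lo + k) ' ') then ((lo + k : Nat) : Int) + 1 else pvWsLoop cs lo k

def snap_back_to_whitespace_py (text : String) (cut : Int) (tolerance : Int) : Int :=
  let cs := text.toList
  let n : Int := cs.length
  if cut ≥ n then n
  else
    let lo : Int := max 0 (cut - tolerance)
    -- rfind adjusts its slice bounds: end = cut, wrapped to n+cut if negative, clamped to [0, n]; start = lo clamped to n
    let e : Int := min (if cut < 0 then max 0 (n + cut) else cut) n
    let s : Nat := (min lo n).toNat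
    let nl := pvRfindNl cs s (e.toNat - s)
    if nl ≠ -1 ∧ nl + 1 > lo then nl + 1
    else
      let ws := pvWsLoop cs lo.toNat (cut - lo).toNat
      if ws ≠ -1 then ws else cut

-- ===== PORT B =====
-- Source B's single backward loop: i = lo+k-1 down to lo; return i+1 at the first '\n',
-- remember the first whitespace as ws (only while ws is None), fall through to ws / cut.
def pvSnapLoop (cs : List Char) (lo : Nat) (cut : Int) (ws : Option Int) : Nat → Int
  | 0 => match ws with | some w => w | none => cut
  | k + 1 =>
    let i : Nat := lo + k
    let c := cs.getD i ' '
    if c = '\n' then (i : Int) + 1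
    else pvSnapLoop cs lo cut
      (if ws = none ∧ PySem.Chars.isspace c then some ((i : Int) + 1) else ws) k

def snap_back_to_whitespace_py_alt (text : String) (cut : Int) (tolerance : Int) : Int :=
  let cs := text.toList
  let n : Int := cs.length
  if cut ≥ n then n
  else
    let lo : Int := max 0 (cut - tolerance)
    pvSnapLoop cs lo.toNat cut none (cut - lo).toNat

-- ===== PRECONDITION & SPEC =====
-- For negative cut with a newline in text[max(0,cut-tolerance):len(text)+cut], A's rfind wraps its end
-- index to len(text)+cut and A returns that newline's index+1, while B treats the walk-back window as
-- empty and returns cut, the intended no-op for a degenerate negative cut.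
def D_snap_back_to_whitespace_py (text : String) (cut : Int) (tolerance : Int) : Prop :=
  cut < 0 ∧ ∃ i : Nat, i < text.toList.length ∧ max 0 (cut - tolerance) ≤ (i : Int) ∧
    (i : Int) < (text.toList.length : Int) + cut ∧ text.toList.getD i ' ' = '\n'
instance (text : String) (cut : Int) (tolerance : Int) : Decidable (D_snap_back_to_whitespace_py text cut tolerance) := by
  unfold D_snap_back_to_whitespace_py; infer_instance

def Spec_snap_back_to_whitespace_py (text : String) (cut : Int) (tolerance : Int) (out : Int) : Prop := ¬ D_snap_back_to_whitespace_py text cut tolerance → out = snap_back_to_whitespace_py_alt text cut tolerance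
instance (text : String) (cut : Int) (tolerance : Int) (out : Int) : Decidable (Spec_snap_back_to_whitespace_py text cut tolerance out) := by unfold Spec_snap_back_to_whitespace_py; infer_instance

def pvDiffWitness_snap_back_to_whitespace_py : String × Int × Int := ("a\nbc", -1, 5)
def pvDiffWitnessOut_snap_back_to_whitespace_py : Int × Int := (2, -1)

-- ===== CLAIM (what is proved, stated in full; the proofs are below) =====
def Claim_unchanged_snap_back_to_whitespace_py : Prop := ∀ (text : String) (cut : Int) (tolerance : Int), Dom_snap_back_to_whitespace_py text cut tolerance → Spec_snap_back_to_whitespace_py text cut tolerance (snap_back_to_whitespace_py text cut tolerance)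
def Claim_changed_snap_back_to_whitespace_py : Prop := Dom_snap_back_to_whitespace_py (pvDiffWitness_snap_back_to_whitespace_py.1) (pvDiffWitness_snap_back_to_whitespace_py.2.1) (pvDiffWitness_snap_back_to_whitespace_py.2.2) ∧ D_snap_back_to_whitespace_py (pvDiffWitness_snap_back_to_whitespace_py.1) (pvDiffWitness_snap_back_to_whitespace_py.2.1) (pvDiffWitness_snap_back_to_whitespace_py.2.2) ∧ snap_back_to_whitespace_py (pvDiffWitness_snap_back_to_whitespace_py.1) (pvDiffWitness_snap_back_to_whitespace_py.2.1) (pvDiffWitness_snap_back_to_whitespace_py.2.2) = pvDiffWitnessOut_snap_back_to_whitespace_py.1 ∧ snap_back_to_whitespace_py_alt (pvDiffWitness_snap_back_to_whitespace_py.1) (pvDiffWitness_snap_back_to_whitespace_py.2.1) (pvDiffWitness_snap_back_to_whitespace_py.2.2) = pvDiffWitnessOut_snap_back_to_whitespace_py.2 ∧ pvDiffWitnessOut_snap_back_to_whitespace_py.1 ≠ pvDiffWitnessOut_snap_back_to_whitespace_py.2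
def Claim_exact_snap_back_to_whitespace_py : Prop := ∀ (text : String) (cut : Int) (tolerance : Int), Dom_snap_back_to_whitespace_py text cut tolerance → D_snap_back_to_whitespace_py text cut tolerance → snap_back_to_whitespace_py text cut tolerance ≠ snap_back_to_whitespace_py_alt text cut tolerance

-- ===== LEMMAS AND PROOFS =====

-- the fusion invariant: B's single loop equals A's rfind-then-whitespace pair on the same window
theorem pvSnapLoop_eq (cs : List Char) (b : Nat) (cut : Int) : ∀ (k : Nat) (ws : Option Int),
    pvSnapLoop cs b cut ws k =
      if pvRfindNl cs b k = -1
      then (match ws with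
            | some w => w
            | none => if pvWsLoop cs b k = -1 then cut else pvWsLoop cs b k)
      else pvRfindNl cs b k + 1 := by
  intro k
  induction k with
  | zero => intro ws; simp [pvSnapLoop, pvRfindNl, pvWsLoop]
  | succ k ih =>
    intro ws
    simp only [pvSnapLoop, pvRfindNl, pvWsLoop, List.getD]
    by_cases hnl : cs[b + k]?.getD ' ' = '\n'
    · have h1 : ¬ ((b : Int) + k = -1) := by omega
      simp [hnl, h1]
    · simp only [if_neg hnl]
      rw [ih]
      by_cases hr : pvRfindNl cs b k = -1
      · simp only [hr]
        match ws with
        | some w => simp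
        | none =>
          by_cases hsp : PySem.Chars.isspace (cs[b + k]?.getD ' ') = true
          · have hne : ¬ ((b : Int) + k + 1 = -1) := by omega
            simp [hsp, hne]
          · simp [hsp]
      · simp [hr]

-- pvRfindNl is -1 or an index ≥ its base
theorem pvRfindNl_cases (cs : List Char) (b : Nat) : ∀ k : Nat,
    pvRfindNl cs b k = -1 ∨ (b : Int) ≤ pvRfindNl cs b k := by
  intro k
  induction k with
  | zero => exact Or.inl rfl
  | succ k ih =>
    simp only [pvRfindNl]
    by_cases h : cs.getD (b + k) ' ' = '\n'
    · rw [if_pos h]; right; push_cast; omega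
    · rw [if_neg h]; exact ih

theorem pvRfindNl_eq_neg_one (cs : List Char) (b : Nat) : ∀ k : Nat,
    (∀ j : Nat, j < k → cs.getD (b + j) ' ' ≠ '\n') → pvRfindNl cs b k = -1 := by
  intro k
  induction k with
  | zero => intro _; rfl
  | succ k ih =>
    intro h
    simp only [pvRfindNl]
    rw [if_neg (h k (Nat.lt_succ_self k)), ih (fun j hj => h j (Nat.lt_succ_of_lt hj))]

theorem pvRfindNl_ne_neg_one (cs : List Char) (b : Nat) : ∀ k : Nat,
    (∃ j : Nat, j < k ∧ cs.getD (b + j) ' ' = '\n') → pvRfindNl cs b k ≠ -1 := by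
  intro k
  induction k with
  | zero => rintro ⟨j, hj, _⟩; omega
  | succ k ih =>
    rintro ⟨j, hj, hc⟩
    simp only [pvRfindNl]
    by_cases h : cs.getD (b + k) ' ' = '\n'
    · rw [if_pos h]; omega
    · rw [if_neg h]
      apply ih
      refine ⟨j, ?_, hc⟩
      rcases Nat.lt_succ_iff_lt_or_eq.mp hj with h' | h'
      · exact h'
      · exact absurd (h' ▸ hc) h

-- A = B whenever 0 ≤ cut (the non-wrapping case); stated over the char list
theorem pv_eq_of_nonneg (cs : List Char) (cut tolerance : Int) (hc0 : 0 ≤ cut) (hcn : cut < (cs.length : Int)) :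
    (let n : Int := cs.length
     let lo : Int := max 0 (cut - tolerance)
     let e : Int := min (if cut < 0 then max 0 (n + cut) else cut) n
     let s : Nat := (min lo n).toNat
     let nl := pvRfindNl cs s (e.toNat - s)
     if nl ≠ -1 ∧ nl + 1 > lo then nl + 1
     else
       let ws := pvWsLoop cs lo.toNat (cut - lo).toNat
       if ws ≠ -1 then ws else cut) =
    (let lo : Int := max 0 (cut - tolerance)
     pvSnapLoop cs lo.toNat cut none (cut - lo).toNat) := by
  simp only
  set n : Int := (cs.length : Int) with hn
  set lo : Int := max 0 (cut - tolerance) with hlo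
  have hlo0 : 0 ≤ lo := le_max_left _ _
  rw [if_neg (by omega : ¬ cut < 0)]
  by_cases hwin : lo ≤ cut
  · -- nonempty (or exactly aligned) window: both loops run over [lo.toNat, cut.toNat)
    have hmin : min lo n = lo := min_eq_left (by omega)
    rw [hmin]
    have hes : (min cut n).toNat - lo.toNat = (cut - lo).toNat := by
      rw [min_eq_left (by omega : cut ≤ n)]
      omega
    rw [hes, pvSnapLoop_eq]
    rcases pvRfindNl_cases cs lo.toNat ((cut - lo).toNat) with h | h
    · rw [if_pos h]
      rw [if_neg (by simp [h])]
      simp only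
      by_cases hws : pvWsLoop cs lo.toNat (cut - lo).toNat = -1
      · simp [hws]
      · simp [hws]
    · have hne : pvRfindNl cs lo.toNat ((cut - lo).toNat) ≠ -1 := by omega
      have hgt : pvRfindNl cs lo.toNat ((cut - lo).toNat) + 1 > lo := by
        have : ((lo.toNat : Nat) : Int) = lo := Int.toNat_of_nonneg hlo0
        omega
      rw [if_neg hne, if_pos ⟨hne, hgt⟩]
  · -- empty window on both sides: lo > cut, rfind window and ws/scan counts are 0
    have hk : (cut - lo).toNat = 0 := by omega
    have hek : (min cut n).toNat - (min lo n).toNat = 0 := by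
      have h1 : min cut n = cut := min_eq_left (by omega)
      have h2 : cut ≤ min lo n := le_min (by omega) (by omega)
      omega
    rw [hk, hek]
    simp [pvRfindNl, pvWsLoop, pvSnapLoop]

-- ===== VERDICT (by name: the statement is the Claim_ definition above) =====
theorem snap_back_to_whitespace_py_spec : Claim_unchanged_snap_back_to_whitespace_py := by
  intro text cut tolerance _ hD
  unfold snap_back_to_whitespace_py snap_back_to_whitespace_py_alt
  simp only
  set cs := text.toList with hcs
  set n : Int := (cs.length : Int) with hn
  by_cases hbig : cut ≥ n
  · rw [if_pos hbig, if_pos hbig]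
  · rw [if_neg hbig, if_neg hbig]
    by_cases hc0 : 0 ≤ cut
    · exact pv_eq_of_nonneg cs cut tolerance hc0 (by omega)
    · -- cut < 0: ¬D gives no newline in the wrapped window, both sides return cut
      set lo : Int := max 0 (cut - tolerance) with hlo
      have hlo0 : 0 ≤ lo := le_max_left _ _
      rw [if_pos (by omega : cut < 0)]
      have hk : (cut - lo).toNat = 0 := by omega
      have hrf : pvRfindNl cs ((min lo n).toNat) ((min (max 0 (n + cut)) n).toNat - (min lo n).toNat) = -1 := by
        apply pvRfindNl_eq_neg_one
        intro j hj hnl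
        apply hD
        unfold D_snap_back_to_whitespace_py
        rw [← hcs]
        refine ⟨by omega, (min lo n).toNat + j, ?_, ?_, ?_, hnl⟩
        · -- index < cs.length
          have : (min lo n).toNat + j < (min (max 0 (n + cut)) n).toNat := by omega
          have h2 : (min (max 0 (n + cut)) n).toNat ≤ n.toNat := by
            have := min_le_right (max 0 (n + cut)) n
            omega
          omega
        · -- lo ≤ index
          have : lo ≤ min lo n ∨ (min (max 0 (n + cut)) n).toNat ≤ (min lo n).toNat := by
            by_cases h : lo ≤ n
            · left; omega
            · right
              have h1 : min lo n = n := min_eq_right (by omega)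
              have h2 : min (max 0 (n + cut)) n ≤ n := min_le_right _ _
              omega
          rcases this with h | h
          · push_cast; omega
          · omega
        · -- index < n + cut
          have h1 : (min lo n).toNat + j < (min (max 0 (n + cut)) n).toNat := by omega
          have h2 : min (max 0 (n + cut)) n ≤ max 0 (n + cut) := min_le_left _ _
          by_cases h3 : 0 ≤ n + cut
          · have : max 0 (n + cut) = n + cut := max_eq_right h3
            push_cast
            omega
          · have : max 0 (n + cut) = 0 := max_eq_left (by omega)
            omega
      rw [if_neg (by simp [hrf]), hk]
      simp [pvWsLoop, pvSnapLoop]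

theorem snap_back_to_whitespace_py_changed : Claim_changed_snap_back_to_whitespace_py := by
  unfold Claim_changed_snap_back_to_whitespace_py; decide

theorem snap_back_to_whitespace_py_tight : Claim_exact_snap_back_to_whitespace_py := by
  intro text cut tolerance _ hD
  obtain ⟨hneg, i, hilen, hloi, hicut, hnl⟩ := hD
  unfold snap_back_to_whitespace_py snap_back_to_whitespace_py_alt
  simp only
  set cs := text.toList with hcs
  set n : Int := (cs.length : Int) with hn
  have hbig : ¬ cut ≥ n := by omega
  rw [if_neg hbig, if_neg hbig, if_pos (by omega : cut < 0)]
  set lo : Int := max 0 (cut - tolerance) with hlo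
  have hlo0 : 0 ≤ lo := le_max_left _ _
  have hlon : lo ≤ n := by omega
  have hminlo : min lo n = lo := min_eq_left hlon
  have hmine : min (max 0 (n + cut)) n = n + cut := by
    have h1 : max 0 (n + cut) = n + cut := max_eq_right (by omega)
    rw [h1]; exact min_eq_left (by omega)
  rw [hminlo, hmine]
  -- rfind hits the newline at i
  have hrf : pvRfindNl cs lo.toNat ((n + cut).toNat - lo.toNat) ≠ -1 := by
    apply pvRfindNl_ne_neg_one
    refine ⟨i - lo.toNat, by omega, ?_⟩
    have : lo.toNat + (i - lo.toNat) = i := by omega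
    rw [this]; exact hnl
  rcases pvRfindNl_cases cs lo.toNat ((n + cut).toNat - lo.toNat) with h | h
  · exact absurd h hrf
  · have hgt : pvRfindNl cs lo.toNat ((n + cut).toNat - lo.toNat) + 1 > lo := by
      have : ((lo.toNat : Nat) : Int) = lo := Int.toNat_of_nonneg hlo0
      omega
    rw [if_pos ⟨hrf, hgt⟩]
    -- A = nl + 1 ≥ 1 > cut = B
    have hkB : (cut - lo).toNat = 0 := by omega
    rw [hkB]
    simp only [pvSnapLoop]
    omega
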